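-- pv_equiv track=rewrite | github.com/patt502090/Smart-Pest-Guardian | src/forecasting/baselines.py | find_feasible_window
-- ===== SOURCE A (Python) =====
-- from typing import Dict, Iterable, List, Tuple
--
-- def find_feasible_window(series_length: int, desired_window: int, desired_horizon: int) -> Tuple[int, int]:
--     """Reduce window/horizon gracefully until at leastหนึ่งหน้าต่างใช้งานได้."""
--
--     if series_length < 2:
--         raise ValueError("ข้อมูลมีจำนวนน้อยเกินไปสำหรับ baseline")
--
--     max_window = min(desired_window, series_length - 1)
--     for window in range(max_window, 0, -1):
--         max_horizon = min(desired_horizon, series_length - window)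
--         for horizon in range(max_horizon, 0, -1):
--             if series_length - window - horizon + 1 > 0:
--                 return window, horizon
--     raise ValueError("ข้อมูลไม่เพียงพอ แม้ลด window/horizon แล้ว")
-- ===== SOURCE B (Python) =====
-- def find_feasible_window(series_length: int, desired_window: int, desired_horizon: int):
--     """Closed-form: A always returns on its first feasible iteration."""
--     if series_length < 2:
--         raise ValueError("ข้อมูลมีจำนวนน้อยเกินไปสำหรับ baseline")
--     window = min(desired_window, series_length - 1)
--     if window >= 1 and desired_horizon >= 1:
--         return window, min(desired_horizon, series_length - window)
--     raise ValueError("ข้อมูลไม่เพียงพอ แม้ลด window/horizon แล้ว")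
-- ===== Notes on version B (the rewrite author's own statement) =====
-- stated objective: simpler
-- what changed: Replaced the two nested descending loops with a closed-form computation (the loops always return on their very first feasible iteration), keeping both ValueError cases.
import Mathlib
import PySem

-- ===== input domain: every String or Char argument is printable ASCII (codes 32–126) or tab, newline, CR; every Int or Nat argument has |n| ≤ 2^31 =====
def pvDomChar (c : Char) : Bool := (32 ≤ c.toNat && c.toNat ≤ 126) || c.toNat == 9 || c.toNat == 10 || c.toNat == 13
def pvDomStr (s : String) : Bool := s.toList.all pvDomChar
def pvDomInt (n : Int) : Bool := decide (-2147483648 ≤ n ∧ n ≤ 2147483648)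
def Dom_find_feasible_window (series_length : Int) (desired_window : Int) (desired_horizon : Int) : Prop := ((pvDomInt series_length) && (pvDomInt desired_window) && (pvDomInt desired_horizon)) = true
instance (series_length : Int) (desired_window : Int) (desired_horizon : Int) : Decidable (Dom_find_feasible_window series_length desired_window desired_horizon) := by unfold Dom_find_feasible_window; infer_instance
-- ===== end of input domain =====

-- B replaces A's two nested descending loops (which always return on their first feasible
-- iteration) by a closed-form computation; objective: simpler.


-- ===== PORT A =====
-- inner 'for horizon in range(max_horizon, 0, -1)' loop (countdown written as decreasing
-- recursion on horizon; exact: visits max_horizon, max_horizon-1, …, 1): first feasible horizon or none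
def ffwInner (series_length window horizon : Int) : Option (Int × Int) :=
  if _hp : 0 < horizon then
    if series_length - window - horizon + 1 > 0 then some (window, horizon)
    else ffwInner series_length window (horizon - 1)
  else none
termination_by horizon.toNat
decreasing_by omega

-- outer 'for window in range(max_window, 0, -1)' loop, same countdown shape
def ffwOuter (series_length desired_horizon window : Int) : Option (Int × Int) :=
  if _hp : 0 < window then
    match ffwInner series_length window (min desired_horizon (series_length - window)) with
    | some r => some r
    | none => ffwOuter series_length desired_horizon (window - 1)
  else none
termination_by window.toNat
decreasing_by omega

def find_feasible_window (series_length : Int) (desired_window : Int) (desired_horizon : Int) : Int × Int :=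
  if series_length < 2 then (0, 0)  -- Python raises ValueError here; excluded by Pre_
  else
    match ffwOuter series_length desired_horizon (min desired_window (series_length - 1)) with
    | some r => r
    | none => (0, 0)  -- Python raises ValueError here; excluded by Pre_

-- ===== PORT B =====
def find_feasible_window_alt (series_length : Int) (desired_window : Int) (desired_horizon : Int) : Int × Int :=
  if series_length < 2 then (0, 0)  -- raise; excluded by Pre_
  else
    let window := min desired_window (series_length - 1)
    if window ≥ 1 ∧ desired_horizon ≥ 1 then (window, min desired_horizon (series_length - window))
    else (0, 0)  -- raise; excluded by Pre_

-- ===== PRECONDITION & SPEC =====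
-- Exactly the inputs on which Python A returns (otherwise it raises ValueError).
def Pre_find_feasible_window (series_length : Int) (desired_window : Int) (desired_horizon : Int) : Prop :=
  2 ≤ series_length ∧ 1 ≤ desired_window ∧ 1 ≤ desired_horizon
instance (series_length : Int) (desired_window : Int) (desired_horizon : Int) : Decidable (Pre_find_feasible_window series_length desired_window desired_horizon) := by unfold Pre_find_feasible_window; infer_instance

def pvWitness_find_feasible_window : Int × Int × Int := (10, 3, 2)

def Spec_find_feasible_window (series_length : Int) (desired_window : Int) (desired_horizon : Int) (out : Int × Int) : Prop := out = find_feasible_window_alt series_length desired_window desired_horizon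
instance (series_length : Int) (desired_window : Int) (desired_horizon : Int) (out : Int × Int) : Decidable (Spec_find_feasible_window series_length desired_window desired_horizon out) := by unfold Spec_find_feasible_window; infer_instance

-- ===== CLAIM (what is proved, stated in full; the proofs are below) =====
def Claim_equal_find_feasible_window : Prop := ∀ (series_length : Int) (desired_window : Int) (desired_horizon : Int), Dom_find_feasible_window series_length desired_window desired_horizon → Pre_find_feasible_window series_length desired_window desired_horizon → Spec_find_feasible_window series_length desired_window desired_horizon (find_feasible_window series_length desired_window desired_horizon)

-- ===== LEMMAS AND PROOFS =====

-- Under Pre_, the inner loop succeeds on its very first iteration.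
lemma ffwInner_first (n w mh : Int) (h1 : 1 ≤ mh) (h2 : mh ≤ n - w) :
    ffwInner n w mh = some (w, mh) := by
  unfold ffwInner
  rw [dif_pos (by omega), if_pos (by omega)]

-- ===== VERDICT =====
theorem find_feasible_window_spec : Claim_equal_find_feasible_window := by
  intro n dw dh _ ⟨hn, hw, hh⟩
  unfold Spec_find_feasible_window find_feasible_window find_feasible_window_alt
  rw [if_neg (by omega), if_neg (by omega)]
  have hmw : (1:Int) ≤ min dw (n - 1) := le_min hw (by omega)
  unfold ffwOuter
  rw [dif_pos (by omega : (0:Int) < min dw (n - 1)),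
    ffwInner_first n (min dw (n - 1)) (min dh (n - min dw (n - 1)))
      (le_min hh (by omega)) (min_le_right _ _)]
  simp [hmw, hh]
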